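-- pv_equiv track=rewrite | github.com/eiei220101/WX-BRIEF-JCAB-for-PPL-CPL-IR | app.py | group_metar_taf_airports_by_region
-- ===== SOURCE A (Python) =====
-- UI_REGION_GROUPS_METAR_TAF: list[dict] = [
--     {
--         "id": "tohoku_kanto",
--         "title": "東北・関東",
--         "icaos": (
--             "RJSF",
--             "RJSS",
--             "RJSN",
--             "RJSC",
--             "RJSI",
--             "RJSY",
--             "RJSK",
--             "RJTU",
--             "RJAH",
--         ),
--     },
--     {
--         "id": "kyushu",
--         "title": "九州",
--         "icaos": (
--             "RJFF",
--             "RJFR",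
--             "RJFS",
--             "RJFU",
--             "RJDB",
--             "RJDT",
--             "RJFE",
--             "RJDO",
--             "RJDK",
--             "RJFT",
--             "RJDA",
--             "RJFO",
--             "RJFM",
--             "RJFK",
--             "RJFG",
--             "RJFC",
--         ),
--     },
-- ]
--
-- def group_metar_taf_airports_by_region(
--     airports: list[dict],
-- ) -> list[tuple[str, list[dict]]]:
--     """UI 用: (地域タイトル, 空港行) のリスト。未定義の空港は「その他」。"""
--     seen: set[str] = set()
--     blocks: list[tuple[str, list[dict]]] = []
--     for g in UI_REGION_GROUPS_METAR_TAF: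
--         title = str(g.get("title") or "").strip() or "地域"
--         want = [str(x).strip().upper() for x in (g.get("icaos") or ()) if str(x).strip()]
--         if not want:
--             continue
--         order = {c: i for i, c in enumerate(want)}
--         sub = [
--             ap
--             for ap in airports
--             if str(ap.get("icao") or "").strip().upper() in order
--         ]
--         sub.sort(
--             key=lambda ap: order.get(str(ap.get("icao") or "").strip().upper(), 99)
--         )
--         for ap in sub:
--             seen.add(str(ap.get("icao") or "").strip().upper())
--         if sub:
--             blocks.append((title, sub))
--     other = [
--         ap
--         for ap in airports
--         if str(ap.get("icao") or "").strip().upper() not in seen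
--     ]
--     if other:
--         other.sort(key=lambda ap: str(ap.get("icao") or ""))
--         blocks.append(("その他", other))
--     return blocks
-- ===== SOURCE B (Python) =====
-- UI_REGION_GROUPS_METAR_TAF: list[dict] = [
--     {
--         "id": "tohoku_kanto",
--         "title": "東北・関東",
--         "icaos": (
--             "RJSF",
--             "RJSS",
--             "RJSN",
--             "RJSC",
--             "RJSI",
--             "RJSY",
--             "RJSK",
--             "RJTU",
--             "RJAH",
--         ),
--     },
--     {
--         "id": "kyushu",
--         "title": "九州",
--         "icaos": (
--             "RJFF",
--             "RJFR",
--             "RJFS",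
--             "RJFU",
--             "RJDB",
--             "RJDT",
--             "RJFE",
--             "RJDO",
--             "RJDK",
--             "RJFT",
--             "RJDA",
--             "RJFO",
--             "RJFM",
--             "RJFK",
--             "RJFG",
--             "RJFC",
--         ),
--     },
-- ]
--
--
-- def _region_titles_and_index():
--     """Precompute, once, the group titles and a combined index
--     ICAO -> (group_index, order_within_group) from the constant table."""
--     titles = []
--     index = {}
--     for gi, g in enumerate(UI_REGION_GROUPS_METAR_TAF):
--         titles.append(str(g.get("title") or "").strip() or "地域")
--         pos = 0
--         for x in g.get("icaos") or ():
--             c = str(x).strip().upper()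
--             if c:
--                 index[c] = (gi, pos)
--                 pos += 1
--     return titles, index
--
--
-- _TITLES, _INDEX = _region_titles_and_index()
--
--
-- def group_metar_taf_airports_by_region(
--     airports: list[dict],
-- ) -> list[tuple[str, list[dict]]]:
--     """UI 用: (地域タイトル, 空港行) のリスト。未定義の空港は「その他」。"""
--     buckets: list[list[dict]] = [[] for _ in _TITLES]
--     other: list[dict] = []
--     for ap in airports:
--         hit = _INDEX.get(str(ap.get("icao") or "").strip().upper())
--         if hit is None:
--             other.append(ap)
--         else:
--             buckets[hit[0]].append(ap)
--     blocks: list[tuple[str, list[dict]]] = []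
--     for gi, title in enumerate(_TITLES):
--         sub = buckets[gi]
--         if sub:
--             sub.sort(
--                 key=lambda ap: _INDEX[str(ap.get("icao") or "").strip().upper()][1]
--             )
--             blocks.append((title, sub))
--     if other:
--         other.sort(key=lambda ap: str(ap.get("icao") or ""))
--         blocks.append(("その他", other))
--     return blocks
-- ===== Notes on version B (the rewrite author's own statement) =====
-- stated objective: alternative
-- what changed: A rebuilds each region's order dict and filter-scans the whole airport list once per region plus a final 'seen'-set pass; B precomputes a single ICAO->(group,order) index once at module load and distributes the airports into per-region buckets and an 'other' bucket in one pass, then sorts and emits each non-empty bucket.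
import Mathlib
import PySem

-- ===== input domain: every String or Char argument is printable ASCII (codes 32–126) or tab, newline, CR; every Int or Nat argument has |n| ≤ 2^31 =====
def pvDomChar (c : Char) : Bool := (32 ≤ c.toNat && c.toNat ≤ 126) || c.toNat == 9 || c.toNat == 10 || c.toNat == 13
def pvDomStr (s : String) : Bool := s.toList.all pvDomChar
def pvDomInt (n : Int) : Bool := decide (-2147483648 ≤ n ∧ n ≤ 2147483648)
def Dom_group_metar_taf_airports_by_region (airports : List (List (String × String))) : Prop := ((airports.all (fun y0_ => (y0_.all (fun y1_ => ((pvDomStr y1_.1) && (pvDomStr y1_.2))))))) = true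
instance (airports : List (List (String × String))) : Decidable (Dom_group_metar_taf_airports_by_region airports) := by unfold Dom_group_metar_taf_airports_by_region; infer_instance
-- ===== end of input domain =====

-- B replaces A's per-group filter passes over the airport list by one precomputed ICAO→(group, order) index
-- and a single bucketing pass over the airports (objective: alternative decomposition of the same cost).

-- ===== PORT A =====
structure PVRegionGroup where
  id : String
  title : String
  icaos : List String
deriving Repr, DecidableEq

def pvGroupsA : List PVRegionGroup :=
  [⟨"tohoku_kanto", "東北・関東",
    ["RJSF", "RJSS", "RJSN", "RJSC", "RJSI", "RJSY", "RJSK", "RJTU", "RJAH"]⟩,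
   ⟨"kyushu", "九州",
    ["RJFF", "RJFR", "RJFS", "RJFU", "RJDB", "RJDT", "RJFE", "RJDO", "RJDK",
     "RJFT", "RJDA", "RJFO", "RJFM", "RJFK", "RJFG", "RJFC"]⟩]

-- str(ap.get("icao") or "").strip().upper()  ('or ""' maps a missing/empty value to "", identity on other strings)
def pvNormA (ap : List (String × String)) : String :=
  PySem.Str.upper (PySem.Str.strip ((PySem.Dict.mk ap).getD "icao" ""))

def group_metar_taf_airports_by_region (airports : List (List (String × String))) : List (String × (List (List (String × String)))) :=
  let st := pvGroupsA.foldl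
    (fun (st : PySem.Set String × List (String × (List (List (String × String))))) g =>
      let seen := st.1
      let blocks := st.2
      let t := PySem.Str.strip g.title
      let title := if t == "" then "地域" else t
      let want := (g.icaos.filter (fun x => !(PySem.Str.strip x == ""))).map
        (fun x => PySem.Str.upper (PySem.Str.strip x))
      if want.isEmpty then (seen, blocks)
      else
        let order : PySem.Dict String Int :=
          (PySem.List.enumerate want).foldl (fun d p => d.insert p.2 p.1) (PySem.Dict.mk [])
        let sub := airports.filter (fun ap => order.contains (pvNormA ap))
        let sub := PySem.List.sorted sub (fun ap => order.getD (pvNormA ap) 99) false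
        let seen := sub.foldl (fun s ap => PySem.Set.add s (pvNormA ap)) seen
        let blocks := if sub.isEmpty then blocks else blocks ++ [(title, sub)]
        (seen, blocks))
    (([] : PySem.Set String), [])
  let other := airports.filter (fun ap => !(PySem.Set.contains st.1 (pvNormA ap)))
  if other.isEmpty then st.2
  else st.2 ++ [("その他",
    PySem.List.sorted other (fun ap => (PySem.Dict.mk ap).getD "icao" "") false)]

-- ===== PORT B =====
def pvNormB (ap : List (String × String)) : String :=
  PySem.Str.upper (PySem.Str.strip ((PySem.Dict.mk ap).getD "icao" ""))

-- module-level _region_titles_and_index(): titles and the combined ICAO -> (group_index, order) index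
def pvTitlesIndexB : List String × PySem.Dict String (Int × Int) :=
  (PySem.List.enumerate pvGroupsA).foldl
    (fun (st : List String × PySem.Dict String (Int × Int)) p =>
      let t := PySem.Str.strip p.2.title
      let titles := st.1 ++ [if t == "" then "地域" else t]
      let q := p.2.icaos.foldl
        (fun (q : PySem.Dict String (Int × Int) × Int) x =>
          let c := PySem.Str.upper (PySem.Str.strip x)
          if c == "" then q else (q.1.insert c (p.1, q.2), q.2 + 1))
        (st.2, 0)
      (titles, q.1))
    ([], PySem.Dict.mk [])

-- the body of B's single bucketing loop over the airports
def pvStepB (st : List (List (List (String × String))) × List (List (String × String)))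
    (ap : List (String × String)) :
    List (List (List (String × String))) × List (List (String × String)) :=
  match (pvTitlesIndexB.2).get? (pvNormB ap) with
  | none => (st.1, st.2 ++ [ap])
  | some hit => (st.1.set hit.1.toNat ((st.1.getD hit.1.toNat []) ++ [ap]), st.2)

def group_metar_taf_airports_by_region_alt (airports : List (List (String × String))) : List (String × (List (List (String × String)))) :=
  let titles := pvTitlesIndexB.1
  let index := pvTitlesIndexB.2
  let st := airports.foldl pvStepB (titles.map (fun _ => []), [])
  let blocks := (PySem.List.enumerate titles).foldl
    (fun (blocks : List (String × (List (List (String × String))))) p =>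
      let sub := st.1.getD p.1.toNat []
      if sub.isEmpty then blocks
      else blocks ++ [(p.2,
        -- Source B reads _INDEX[key][1]; every bucket member was put there because its key IS in
        -- _INDEX (checked when bucketing), so the default of this total lookup is never observed
        PySem.List.sorted sub (fun ap => (index.getD (pvNormB ap) (0, 0)).2) false)])
    []
  if st.2.isEmpty then blocks
  else blocks ++ [("その他",
    PySem.List.sorted st.2 (fun ap => (PySem.Dict.mk ap).getD "icao" "") false)]

-- ===== PRECONDITION & SPEC =====
def Spec_group_metar_taf_airports_by_region (airports : List (List (String × String))) (out : List (String × (List (List (String × String))))) : Prop := out = group_metar_taf_airports_by_region_alt airports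
instance (airports : List (List (String × String))) (out : List (String × (List (List (String × String))))) : Decidable (Spec_group_metar_taf_airports_by_region airports out) := by unfold Spec_group_metar_taf_airports_by_region; infer_instance

-- ===== CLAIM (what is proved, stated in full; the proofs are below) =====
def Claim_equal_group_metar_taf_airports_by_region : Prop := ∀ (airports : List (List (String × String))), Dom_group_metar_taf_airports_by_region airports → Spec_group_metar_taf_airports_by_region airports (group_metar_taf_airports_by_region airports)

-- ===== LEMMAS AND PROOFS =====

-- the two per-group order dicts A builds, and B's combined index, as literals
def pvOrd0 : PySem.Dict String Int :=
  PySem.Dict.mk [("RJSF", 0), ("RJSS", 1), ("RJSN", 2), ("RJSC", 3), ("RJSI", 4), ("RJSY", 5), ("RJSK", 6), ("RJTU", 7), ("RJAH", 8)]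
def pvOrd1 : PySem.Dict String Int :=
  PySem.Dict.mk [("RJFF", 0), ("RJFR", 1), ("RJFS", 2), ("RJFU", 3), ("RJDB", 4), ("RJDT", 5), ("RJFE", 6), ("RJDO", 7), ("RJDK", 8), ("RJFT", 9), ("RJDA", 10), ("RJFO", 11), ("RJFM", 12), ("RJFK", 13), ("RJFG", 14), ("RJFC", 15)]
def pvIdx : PySem.Dict String (Int × Int) :=
  PySem.Dict.mk [("RJSF", ((0:Int), (0:Int))), ("RJSS", ((0:Int), (1:Int))), ("RJSN", ((0:Int), (2:Int))), ("RJSC", ((0:Int), (3:Int))), ("RJSI", ((0:Int), (4:Int))), ("RJSY", ((0:Int), (5:Int))), ("RJSK", ((0:Int), (6:Int))), ("RJTU", ((0:Int), (7:Int))), ("RJAH", ((0:Int), (8:Int))), ("RJFF", ((1:Int), (0:Int))), ("RJFR", ((1:Int), (1:Int))), ("RJFS", ((1:Int), (2:Int))), ("RJFU", ((1:Int), (3:Int))), ("RJDB", ((1:Int), (4:Int))), ("RJDT", ((1:Int), (5:Int))), ("RJFE", ((1:Int), (6:Int))), ("RJDO", ((1:Int), (7:Int))), ("RJDK", ((1:Int),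 (8:Int))), ("RJFT", ((1:Int), (9:Int))), ("RJDA", ((1:Int), (10:Int))), ("RJFO", ((1:Int), (11:Int))), ("RJFM", ((1:Int), (12:Int))), ("RJFK", ((1:Int), (13:Int))), ("RJFG", ((1:Int), (14:Int))), ("RJFC", ((1:Int), (15:Int)))]

theorem pvTitlesIndexB_eq : pvTitlesIndexB = (["東北・関東", "九州"], pvIdx) := by decide

theorem pvLookup (s : String) :
    (pvOrd0.contains s = ((pvIdx.get? s).map Prod.fst == some 0))
    ∧ (pvOrd1.contains s = ((pvIdx.get? s).map Prod.fst == some 1))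
    ∧ (((pvIdx.get? s).map Prod.fst == some 0) → pvOrd0.getD s 99 = (pvIdx.getD s (0, 0)).2)
    ∧ (((pvIdx.get? s).map Prod.fst == some 1) → pvOrd1.getD s 99 = (pvIdx.getD s (0, 0)).2)
    ∧ (((pvIdx.get? s).map Prod.fst == some 0) ∨ ((pvIdx.get? s).map Prod.fst == some 1) ∨ pvIdx.get? s = none) := by
  by_cases hs : s ∈ pvIdx.keys
  · have hk : pvIdx.keys = ["RJSF", "RJSS", "RJSN", "RJSC", "RJSI", "RJSY", "RJSK", "RJTU", "RJAH", "RJFF", "RJFR", "RJFS", "RJFU", "RJDB", "RJDT", "RJFE", "RJDO", "RJDK", "RJFT", "RJDA", "RJFO", "RJFM", "RJFK", "RJFG", "RJFC"] := by decide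
    rw [hk] at hs
    fin_cases hs <;> decide
  · have hn : pvIdx.get? s = none := by
      rw [PySem.Dict.get?_eq_none_iff_not_mem_keys]; exact hs
    have h0 : pvOrd0.contains s = false := by
      rw [PySem.Dict.contains_eq_decide_mem_keys]
      simp only [decide_eq_false_iff_not]
      intro hm
      apply hs
      have hk0 : pvOrd0.keys = ["RJSF", "RJSS", "RJSN", "RJSC", "RJSI", "RJSY", "RJSK", "RJTU", "RJAH"] := by decide
      rw [hk0] at hm
      fin_cases hm <;> decide
    have h1 : pvOrd1.contains s = false := by
      rw [PySem.Dict.contains_eq_decide_mem_keys]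
      simp only [decide_eq_false_iff_not]
      intro hm
      apply hs
      have hk1 : pvOrd1.keys = ["RJFF", "RJFR", "RJFS", "RJFU", "RJDB", "RJDT", "RJFE", "RJDO", "RJDK", "RJFT", "RJDA", "RJFO", "RJFM", "RJFK", "RJFG", "RJFC"] := by decide
      rw [hk1] at hm
      fin_cases hm <;> decide
    simp [hn, h0, h1]

theorem pvInsertBy_congr {α : Type} (b1 b2 : α → α → Bool) (x : α) (acc : List α)
    (h : ∀ y ∈ acc, b1 x y = b2 x y) :
    PySem.List.insertBy b1 x acc = PySem.List.insertBy b2 x acc := by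
  induction acc with
  | nil => rfl
  | cons y ys ih =>
    simp only [PySem.List.insertBy]
    rw [h y (by simp)]
    by_cases hb : b2 x y = true
    · simp [hb]
    · simp only [Bool.not_eq_true] at hb
      simp [hb]
      exact ih (fun z hz => h z (by simp [hz]))

theorem pvNorm_eq : pvNormB = pvNormA := rfl

theorem pvFoldl_insertBy_congr {α : Type} (k1 k2 : α → Int) (xs acc : List α)
    (hxs : ∀ x ∈ xs, k1 x = k2 x) (hacc : ∀ y ∈ acc, k1 y = k2 y) :
    xs.foldl (fun acc x => PySem.List.insertBy (fun a b => decide (k1 a < k1 b)) x acc) acc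
    = xs.foldl (fun acc x => PySem.List.insertBy (fun a b => decide (k2 a < k2 b)) x acc) acc := by
  induction xs generalizing acc with
  | nil => rfl
  | cons a l ih =>
    simp only [List.foldl_cons]
    rw [pvInsertBy_congr (fun a b => decide (k1 a < k1 b)) (fun a b => decide (k2 a < k2 b)) a acc
      (fun y hy => by simp only []; rw [hxs a (by simp), hacc y hy])]
    refine ih _ (fun x hx => hxs x (by simp [hx])) (fun y hy => ?_)
    rcases (PySem.List.mem_insertBy _ _ _ _).mp hy with h | h
    · rw [h]; exact hxs a (by simp)
    · exact hacc y h

theorem pvSorted_key_congr {α : Type} (xs : List α) (k1 k2 : α → Int)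
    (h : ∀ x ∈ xs, k1 x = k2 x) :
    PySem.List.sorted xs k1 false = PySem.List.sorted xs k2 false := by
  rw [PySem.List.sorted_eq_foldl_insertBy, PySem.List.sorted_eq_foldl_insertBy]
  exact pvFoldl_insertBy_congr k1 k2 xs [] h (by simp)

-- B-side predicates / key, and both sides' named sub-expressions (proof helpers)
def pvQ0 (ap : List (String × String)) : Bool := (pvIdx.get? (pvNormA ap)).map Prod.fst == some 0
def pvQ1 (ap : List (String × String)) : Bool := (pvIdx.get? (pvNormA ap)).map Prod.fst == some 1
def pvQN (ap : List (String × String)) : Bool := (pvIdx.get? (pvNormA ap)).isNone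
def pvKeyB (ap : List (String × String)) : Int := (pvIdx.getD (pvNormA ap) (0, 0)).2
def pvRawKey (ap : List (String × String)) : String := (PySem.Dict.mk ap).getD "icao" ""

def pvSubA0 (airports : List (List (String × String))) : List (List (String × String)) :=
  PySem.List.sorted (airports.filter (fun ap => pvOrd0.contains (pvNormA ap))) (fun ap => pvOrd0.getD (pvNormA ap) 99) false
def pvSubA1 (airports : List (List (String × String))) : List (List (String × String)) :=
  PySem.List.sorted (airports.filter (fun ap => pvOrd1.contains (pvNormA ap))) (fun ap => pvOrd1.getD (pvNormA ap) 99) false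
def pvSeenA (airports : List (List (String × String))) : PySem.Set String :=
  (pvSubA1 airports).foldl (fun s ap => PySem.Set.add s (pvNormA ap))
    ((pvSubA0 airports).foldl (fun s ap => PySem.Set.add s (pvNormA ap)) ([] : PySem.Set String))
def pvOtherA (airports : List (List (String × String))) : List (List (String × String)) :=
  airports.filter (fun ap => !(PySem.Set.contains (pvSeenA airports) (pvNormA ap)))

theorem pvA_explicit (airports : List (List (String × String))) :
    group_metar_taf_airports_by_region airports =
      (if (pvOtherA airports).isEmpty then
        (if (pvSubA1 airports).isEmpty then
          (if (pvSubA0 airports).isEmpty then [] else [("東北・関東", pvSubA0 airports)])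
        else
          (if (pvSubA0 airports).isEmpty then [] else [("東北・関東", pvSubA0 airports)]) ++ [("九州", pvSubA1 airports)])
      else
        (if (pvSubA1 airports).isEmpty then
          (if (pvSubA0 airports).isEmpty then [] else [("東北・関東", pvSubA0 airports)])
        else
          (if (pvSubA0 airports).isEmpty then [] else [("東北・関東", pvSubA0 airports)]) ++ [("九州", pvSubA1 airports)])
        ++ [("その他", PySem.List.sorted (pvOtherA airports) pvRawKey false)]) := by
  rfl

def pvStAlt (airports : List (List (String × String))) :
    List (List (List (String × String))) × List (List (String × String)) :=
  airports.foldl pvStepB ([[], []], [])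

theorem pvB_explicit (airports : List (List (String × String))) :
    group_metar_taf_airports_by_region_alt airports =
      (if (pvStAlt airports).2.isEmpty then
        (if ((pvStAlt airports).1.getD 1 []).isEmpty then
          (if ((pvStAlt airports).1.getD 0 []).isEmpty then []
           else [("東北・関東", PySem.List.sorted ((pvStAlt airports).1.getD 0 []) pvKeyB false)])
        else
          (if ((pvStAlt airports).1.getD 0 []).isEmpty then []
           else [("東北・関東", PySem.List.sorted ((pvStAlt airports).1.getD 0 []) pvKeyB false)])
          ++ [("九州", PySem.List.sorted ((pvStAlt airports).1.getD 1 []) pvKeyB false)])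
      else
        (if ((pvStAlt airports).1.getD 1 []).isEmpty then
          (if ((pvStAlt airports).1.getD 0 []).isEmpty then []
           else [("東北・関東", PySem.List.sorted ((pvStAlt airports).1.getD 0 []) pvKeyB false)])
        else
          (if ((pvStAlt airports).1.getD 0 []).isEmpty then []
           else [("東北・関東", PySem.List.sorted ((pvStAlt airports).1.getD 0 []) pvKeyB false)])
          ++ [("九州", PySem.List.sorted ((pvStAlt airports).1.getD 1 []) pvKeyB false)])
        ++ [("その他", PySem.List.sorted (pvStAlt airports).2 pvRawKey false)]) := by
  rfl

theorem pvFold (airports : List (List (String × String))) (b0 b1 o : List (List (String × String))) :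
    airports.foldl pvStepB ([b0, b1], o) =
      ([b0 ++ airports.filter pvQ0, b1 ++ airports.filter pvQ1], o ++ airports.filter pvQN) := by
  induction airports generalizing b0 b1 o with
  | nil => simp
  | cons a l ih =>
    have hstep : pvStepB ([b0, b1], o) a =
        match pvIdx.get? (pvNormA a) with
        | none => ([b0, b1], o ++ [a])
        | some hit => (List.set [b0, b1] hit.1.toNat ((List.getD [b0, b1] hit.1.toNat []) ++ [a]), o) := by
      unfold pvStepB
      rw [pvTitlesIndexB_eq, pvNorm_eq]
    rcases (pvLookup (pvNormA a)).2.2.2.2 with h | h | h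
    · -- group 0
      rcases hg : pvIdx.get? (pvNormA a) with _ | hit
      · rw [hg] at h; simp at h
      · rw [hg] at h
        simp only [Option.map_some] at h
        have h1 : hit.1 = 0 := by simpa using h
        have hq0 : pvQ0 a = true := by simp [pvQ0, hg, h1]
        have hq1 : pvQ1 a = false := by simp [pvQ1, hg, h1]
        have hqn : pvQN a = false := by simp [pvQN, hg]
        simp only [List.foldl_cons, hstep, hg, h1]
        rw [show ((0:Int)).toNat = 0 from rfl]
        simp only [List.set, List.getD, List.getElem?_cons_zero, Option.getD_some]
        rw [ih]
        simp [hq0, hq1, hqn]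
    · -- group 1
      rcases hg : pvIdx.get? (pvNormA a) with _ | hit
      · rw [hg] at h; simp at h
      · rw [hg] at h
        simp only [Option.map_some] at h
        have h1 : hit.1 = 1 := by simpa using h
        have hq0 : pvQ0 a = false := by simp [pvQ0, hg, h1]
        have hq1 : pvQ1 a = true := by simp [pvQ1, hg, h1]
        have hqn : pvQN a = false := by simp [pvQN, hg]
        simp only [List.foldl_cons, hstep, hg, h1]
        rw [show ((1:Int)).toNat = 1 from rfl]
        simp only [List.set, List.getD, List.getElem?_cons_succ, List.getElem?_cons_zero, Option.getD_some]
        rw [ih]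
        simp [hq0, hq1, hqn]
    · -- unknown icao
      have hq0 : pvQ0 a = false := by simp [pvQ0, h]
      have hq1 : pvQ1 a = false := by simp [pvQ1, h]
      have hqn : pvQN a = true := by simp [pvQN, h]
      simp only [List.foldl_cons, hstep, h]
      rw [ih]
      simp [hq0, hq1, hqn]

theorem pvStAlt_eq (airports : List (List (String × String))) :
    pvStAlt airports = ([airports.filter pvQ0, airports.filter pvQ1], airports.filter pvQN) := by
  unfold pvStAlt
  rw [pvFold]
  simp

theorem pvE0 (airports : List (List (String × String))) :
    pvSubA0 airports = PySem.List.sorted (airports.filter pvQ0) pvKeyB false := by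
  unfold pvSubA0
  rw [show (fun ap => pvOrd0.contains (pvNormA ap)) = pvQ0 from funext fun ap => (pvLookup (pvNormA ap)).1]
  exact pvSorted_key_congr _ _ _ (fun x hx =>
    (pvLookup (pvNormA x)).2.2.1 (by simpa [pvQ0] using List.of_mem_filter hx))

theorem pvE1 (airports : List (List (String × String))) :
    pvSubA1 airports = PySem.List.sorted (airports.filter pvQ1) pvKeyB false := by
  unfold pvSubA1
  rw [show (fun ap => pvOrd1.contains (pvNormA ap)) = pvQ1 from funext fun ap => (pvLookup (pvNormA ap)).2.1]
  exact pvSorted_key_congr _ _ _ (fun x hx =>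
    (pvLookup (pvNormA x)).2.2.2.1 (by simpa [pvQ1] using List.of_mem_filter hx))

theorem pvMem_subA0 (airports : List (List (String × String))) (b : List (String × String))
    (hb : b ∈ pvSubA0 airports) : ((pvIdx.get? (pvNormA b)).map Prod.fst == some 0) = true := by
  unfold pvSubA0 at hb
  rw [PySem.List.mem_sorted] at hb
  have := List.of_mem_filter hb
  rwa [(pvLookup (pvNormA b)).1] at this

theorem pvMem_subA1 (airports : List (List (String × String))) (b : List (String × String))
    (hb : b ∈ pvSubA1 airports) : ((pvIdx.get? (pvNormA b)).map Prod.fst == some 1) = true := by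
  unfold pvSubA1 at hb
  rw [PySem.List.mem_sorted] at hb
  have := List.of_mem_filter hb
  rwa [(pvLookup (pvNormA b)).2.1] at this

theorem pvEOther (airports : List (List (String × String))) :
    pvOtherA airports = airports.filter pvQN := by
  unfold pvOtherA
  apply List.filter_congr
  intro ap hap
  have hmem : PySem.Set.contains (pvSeenA airports) (pvNormA ap) = true ↔
      (∃ b ∈ pvSubA0 airports, pvNormA ap = pvNormA b)
      ∨ (∃ b ∈ pvSubA1 airports, pvNormA ap = pvNormA b) := by
    unfold pvSeenA
    rw [PySem.Set.contains_iff]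
    simp [PySem.Set.mem_foldl_add]
  rcases hg : pvIdx.get? (pvNormA ap) with _ | hit
  · have hc : PySem.Set.contains (pvSeenA airports) (pvNormA ap) = false := by
      rw [Bool.eq_false_iff]
      intro h
      rcases hmem.mp h with ⟨b, hb, he⟩ | ⟨b, hb, he⟩
      · have := pvMem_subA0 airports b hb
        rw [← he, hg] at this
        simp at this
      · have := pvMem_subA1 airports b hb
        rw [← he, hg] at this
        simp at this
    have hq : pvQN ap = true := by simp [pvQN, hg]
    simp only [hc, hq, Bool.not_false]
  · have hc : PySem.Set.contains (pvSeenA airports) (pvNormA ap) = true := by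
      rcases (pvLookup (pvNormA ap)).2.2.2.2 with h | h | h
      · refine hmem.mpr (Or.inl ⟨ap, ?_, rfl⟩)
        unfold pvSubA0
        rw [PySem.List.mem_sorted]
        exact List.mem_filter.mpr ⟨hap, by rw [(pvLookup (pvNormA ap)).1]; exact h⟩
      · refine hmem.mpr (Or.inr ⟨ap, ?_, rfl⟩)
        unfold pvSubA1
        rw [PySem.List.mem_sorted]
        exact List.mem_filter.mpr ⟨hap, by rw [(pvLookup (pvNormA ap)).2.1]; exact h⟩
      · rw [hg] at h; simp at h
    have hq : pvQN ap = false := by simp [pvQN, hg]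
    simp only [hc, hq, Bool.not_true]

theorem pvSorted_isEmpty {α κ : Type} [LT κ] [DecidableLT κ] (xs : List α) (k : α → κ) :
    (PySem.List.sorted xs k false).isEmpty = xs.isEmpty := by
  rcases h : xs.isEmpty with _ | _
  · simp only [List.isEmpty_eq_false_iff] at h ⊢
    intro hc; exact h ((PySem.List.sorted_eq_nil_iff xs k false).mp hc)
  · simp only [List.isEmpty_iff] at h ⊢
    exact (PySem.List.sorted_eq_nil_iff xs k false).mpr h

-- ===== VERDICT (by name: the statement is the Claim_ definition above) =====
theorem group_metar_taf_airports_by_region_spec : Claim_equal_group_metar_taf_airports_by_region := by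
  intro airports _
  unfold Spec_group_metar_taf_airports_by_region
  rw [pvA_explicit, pvB_explicit, pvStAlt_eq, pvE0, pvE1, pvEOther]
  simp only [List.getD_cons_zero, List.getD_cons_succ, pvSorted_isEmpty]
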